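-- pv_equiv track=rewrite | github.com/erikstoklasa/PythonAlgorithms | 04-assignment/compose.py | removeZeroes
-- ===== SOURCE A (Python) =====
-- def removeZeroes(string):
--     out = ""
--     for s in string.split(" "):
--         if not s.lstrip("0"):
--             out += "0"
--         else:
--             out += s.lstrip("0")
--     return out
-- ===== SOURCE B (Python) =====
-- def removeZeroes(string):
--     # one pass over the characters: `leading` = still in the leading-zero run of the current token
--     out = []
--     leading = True
--     for ch in string:
--         if ch == ' ':
--             if leading:
--                 out.append('0')
--             leading = True
--         elif leading and ch == '0':
--             pass
--         else:
--             out.append(ch)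
--             leading = False
--     if leading:
--         out.append('0')
--     return ''.join(out)
-- ===== Notes on version B (the rewrite author's own statement) =====
-- stated objective: alternative
-- what changed: Replaced the split-into-tokens then strip-leading-zeros-per-token pipeline by a single stateful left-to-right character scan with a leading-run flag that emits kept characters directly and flushes a placeholder for empty or all-zero tokens.
import Mathlib
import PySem

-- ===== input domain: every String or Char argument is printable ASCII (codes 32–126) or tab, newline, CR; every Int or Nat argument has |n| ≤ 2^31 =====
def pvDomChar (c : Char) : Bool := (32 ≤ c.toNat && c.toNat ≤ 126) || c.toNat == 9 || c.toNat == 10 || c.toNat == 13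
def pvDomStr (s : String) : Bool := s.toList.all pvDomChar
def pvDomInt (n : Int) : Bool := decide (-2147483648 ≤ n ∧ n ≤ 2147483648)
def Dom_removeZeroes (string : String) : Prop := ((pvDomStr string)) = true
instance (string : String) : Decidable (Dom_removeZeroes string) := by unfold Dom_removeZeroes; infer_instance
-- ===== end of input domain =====

-- B replaces split-then-lstrip-per-token with a single character scan carrying a `leading` flag (same result, different decomposition).

-- ===== PORT A =====
-- s.lstrip("0") for the literal strip-set "0": drop leading '0' characters (exact).
def pyLstripZeros (t : List Char) : List Char := t.dropWhile (fun c => c == '0')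

def removeZeroes (string : String) : String :=
  String.mk ((PySem.Chars.splitOn string.toList [' ']).foldl
    (fun out s =>
      if (pyLstripZeros s).isEmpty then out ++ ['0'] else out ++ pyLstripZeros s) [])

-- ===== PORT B =====
-- the loop of Source B: state = (leading, out); final flush after the loop
def scanB : List Char → Bool → List Char → List Char
  | [], leading, out => if leading then out ++ ['0'] else out
  | ch :: rest, leading, out =>
    if ch = ' ' then scanB rest true (if leading then out ++ ['0'] else out)
    else if leading && (ch = '0') then scanB rest leading out
    else scanB rest false (out ++ [ch])

def removeZeroes_alt (string : String) : String :=
  String.mk (scanB string.toList true [])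

-- ===== PRECONDITION & SPEC =====
def Spec_removeZeroes (string : String) (out : String) : Prop := out = removeZeroes_alt string
instance (string : String) (out : String) : Decidable (Spec_removeZeroes string out) := by unfold Spec_removeZeroes; infer_instance

-- ===== CLAIM (what is proved, stated in full; the proofs are below) =====
def Claim_equal_removeZeroes : Prop := ∀ (string : String), Dom_removeZeroes string → Spec_removeZeroes string (removeZeroes string)

-- ===== LEMMAS AND PROOFS =====

-- reference splitter: mySplit cs cur = tokens of cs (split at ' '), cur = reversed pending chars
def mySplit : List Char → List Char → List (List Char)
  | [], cur => [cur.reverse]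
  | c :: rest, cur => if c = ' ' then cur.reverse :: mySplit rest [] else mySplit rest (c :: cur)

-- per-token output of A
def ftok (t : List Char) : List Char :=
  if (pyLstripZeros t).isEmpty then ['0'] else pyLstripZeros t

theorem mySplit_ne_nil (cs cur : List Char) : mySplit cs cur ≠ [] := by
  induction cs generalizing cur with
  | nil => simp [mySplit]
  | cons c rest ih => simp only [mySplit]; split <;> simp [ih]

theorem go_eq (fuel : Nat) : ∀ (cs cur : List Char) (acc : List (List Char)),
    cs.length < fuel →
    PySem.Chars.splitOn.go [' '] fuel cs cur acc = acc.reverse ++ mySplit cs cur := by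
  induction fuel with
  | zero => intro cs cur acc h; omega
  | succ fuel ih =>
    intro cs cur acc h
    cases cs with
    | nil => simp [PySem.Chars.splitOn.go, mySplit]
    | cons c rest =>
      simp only [PySem.Chars.splitOn.go, List.isPrefixOf, List.length_cons] at *
      by_cases hc : c = ' '
      · subst hc
        simp only [beq_self_eq_true, Bool.true_and, List.isPrefixOf_nil_left, if_pos, List.length,
          List.drop_succ_cons, List.drop_zero]
        rw [ih rest [] (cur.reverse :: acc) (by omega)]
        simp [mySplit]
      · rw [if_neg (by simp; intro h'; exact hc h'.symm)]
        rw [ih rest (c :: cur) acc (by omega)]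
        simp [mySplit, hc]

theorem splitOn_eq (cs : List Char) :
    PySem.Chars.splitOn cs [' '] = mySplit cs [] := by
  unfold PySem.Chars.splitOn
  rw [go_eq (cs.length + 1) cs [] [] (by omega)]
  simp

theorem foldl_tok (tokens : List (List Char)) (out : List Char) :
    tokens.foldl (fun out s =>
      if (pyLstripZeros s).isEmpty then out ++ ['0'] else out ++ pyLstripZeros s) out
    = out ++ (tokens.map ftok).flatten := by
  induction tokens generalizing out with
  | nil => simp
  | cons t ts ih =>
    simp only [List.foldl_cons, List.map_cons, List.flatten_cons, ih, ftok]
    split <;> simp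

-- head-token decomposition of mySplit with pending chars
theorem mySplit_cur (cs : List Char) : ∀ cur,
    mySplit cs cur = (cur.reverse ++ (mySplit cs []).headI) :: (mySplit cs []).tail := by
  induction cs with
  | nil => intro cur; simp [mySplit]
  | cons c rest ih =>
    intro cur
    by_cases hc : c = ' '
    · subst hc; simp [mySplit]
    · simp only [mySplit, if_neg hc]
      rw [ih (c :: cur), ih [c]]
      simp

-- the emitted suffixes of the scanner, by state
mutual
def emitT : List Char → List Char
  | [] => ['0']
  | c :: rest =>
    if c = ' ' then '0' :: emitT rest
    else if c = '0' then emitT rest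
    else c :: emitF rest
def emitF : List Char → List Char
  | [] => []
  | c :: rest => if c = ' ' then emitT rest else c :: emitF rest
end
theorem scanB_emit (cs : List Char) : ∀ (b : Bool) (out : List Char),
    scanB cs b out = out ++ (if b then emitT cs else emitF cs) := by
  induction cs with
  | nil => intro b out; cases b <;> simp [scanB, emitT, emitF]
  | cons c rest ih =>
    intro b out
    by_cases hc : c = ' '
    · subst hc
      cases b <;> simp [scanB, emitT, emitF, ih]
    · by_cases hz : c = '0'
      · subst hz
        cases b <;> simp [scanB, emitT, emitF, hc, ih]
      · cases b <;> simp [scanB, emitT, emitF, hc, hz, ih]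

theorem emit_eq (cs : List Char) :
    emitT cs = ((mySplit cs []).map ftok).flatten ∧
    emitF cs = (mySplit cs []).headI ++ (((mySplit cs []).tail).map ftok).flatten := by
  induction cs with
  | nil => simp [mySplit, emitT, emitF, ftok, pyLstripZeros]
  | cons c rest ih =>
    obtain ⟨ihT, ihF⟩ := ih
    obtain ⟨h, t, hht⟩ : ∃ h t, mySplit rest [] = h :: t := by
      cases hms : mySplit rest [] with
      | nil => exact absurd hms (mySplit_ne_nil rest [])
      | cons h t => exact ⟨h, t, rfl⟩
    by_cases hc : c = ' '
    · subst hc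
      constructor <;>
        simp [mySplit, emitT, emitF, ihT, ihF, ftok, pyLstripZeros]
    · have hsplit : mySplit (c :: rest) [] = (c :: h) :: t := by
        simp only [mySplit, if_neg hc]
        rw [mySplit_cur rest [c], hht]
        simp
      by_cases hz : c = '0'
      · subst hz
        constructor
        · simp only [emitT, if_neg (by decide : ('0':Char) ≠ ' '), if_pos rfl, ihT, hsplit, hht]
          simp [ftok, pyLstripZeros]
        · simp [emitF, hc, ihF, hsplit, hht]
      · have hf : ftok (c :: h) = c :: h := by
          simp [ftok, pyLstripZeros, List.dropWhile_cons, hz]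
        constructor
        · simp only [emitT, if_neg hc, if_neg hz, hsplit, List.map_cons, List.flatten_cons, hf,
            ihF, hht]
          simp
        · simp [emitF, hc, hz, ihF, hsplit, hht]

-- ===== VERDICT (by name: the statement is the Claim_ definition above) =====
theorem removeZeroes_spec : Claim_equal_removeZeroes := by
  intro s _
  unfold Spec_removeZeroes removeZeroes removeZeroes_alt
  rw [splitOn_eq, foldl_tok, scanB_emit]
  simp [(emit_eq s.toList).1]
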